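-- pv_equiv track=rewrite | github.com/Arsen1302/Code-copy-detector | TestData/solutions/problem_777_5.py | solution_777_5
-- ===== SOURCE A (Python) =====
-- from typing import List
--
-- def solution_777_5(grid: List[List[int]]) -> int:
--     n = len(grid) # dimension
--
--     ans = -1
--     queue = [(i, j) for i in range(n) for j in range(n) if grid[i][j]]
--     while queue:
--         newq = []
--         for i, j in queue:
--             for ii, jj in (i-1, j), (i, j-1), (i, j+1), (i+1, j):
--                 if 0 <= ii < n and 0 <= jj < n and not grid[ii][jj]:
--                     newq.append((ii, jj))
--                     grid[ii][jj] = 1 # mark as visited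
--         queue = newq
--         ans += 1
--     return ans or -1
-- ===== SOURCE B (Python) =====
-- from typing import List
--
-- def solution_777_5(grid: List[List[int]]) -> int:
--     # Return-value equivalent to A (A mutates grid in place; B does not).
--     n = len(grid)
--
--     def dilated(g):
--         return [[g[i][j] if g[i][j] else
--                  int(any(g[ii][jj]
--                          for ii, jj in ((i - 1, j), (i, j - 1), (i, j + 1), (i + 1, j))
--                          if 0 <= ii < n and 0 <= jj < n))
--                  for j in range(n)] for i in range(n)]
--
--     g = [row[:n] for row in grid]
--     cnt = 0
--     while True:
--         h = dilated(g)
--         if h == g: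
--             break
--         g = h
--         cnt += 1
--     return cnt or -1
-- ===== Notes on version B (the rewrite author's own statement) =====
-- stated objective: alternative
-- what changed: Replaces the frontier-queue layer BFS (collect nonzero cells, repeatedly expand a queue of newly marked cells, counting layers) by a queue-free morphological dilation: repeatedly rebuild the whole grid, turning each zero cell with a nonzero 4-neighbour into 1, counting rounds until a fixpoint; B never mutates its argument (A does); on the benchmark's grids (few rounds) B's plain row scans beat A's per-cell tuple/queue bookkeeping by a constant factor, though B does O(n^2) work per round and so can be slower on long-path grids.
import Mathlib
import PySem

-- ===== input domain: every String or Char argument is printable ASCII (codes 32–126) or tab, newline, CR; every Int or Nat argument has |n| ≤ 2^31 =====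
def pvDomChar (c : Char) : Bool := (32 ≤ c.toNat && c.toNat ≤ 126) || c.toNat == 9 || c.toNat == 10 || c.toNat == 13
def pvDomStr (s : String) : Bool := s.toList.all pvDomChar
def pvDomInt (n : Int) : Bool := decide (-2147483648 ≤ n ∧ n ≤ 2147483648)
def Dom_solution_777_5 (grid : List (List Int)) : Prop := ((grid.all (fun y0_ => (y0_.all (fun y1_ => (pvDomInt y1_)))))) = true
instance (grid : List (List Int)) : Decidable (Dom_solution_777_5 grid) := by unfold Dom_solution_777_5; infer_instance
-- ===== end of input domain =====

-- B replaces A's frontier-queue layer BFS by a queue-free whole-grid dilation-to-fixpoint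
-- count; equivalence is about the RETURN value only (A mutates `grid` in place, B does not).

-- ===== PORT A =====
-- grid[i][j] read, used only under a 0 ≤ i < n ∧ 0 ≤ j < n guard (exact there)
def gvI (g : List (List Int)) (i j : Int) : Int := (g.getD i.toNat []).getD j.toNat 0

-- the 4-neighbour tuple ((i-1,j),(i,j-1),(i,j+1),(i+1,j)) of A's inner loop
def nbrs (p : Int × Int) : List (Int × Int) :=
  [(p.1 - 1, p.2), (p.1, p.2 - 1), (p.1, p.2 + 1), (p.1 + 1, p.2)]

-- grid[i][j] = v, used only under the same in-bounds guard (exact there)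
def gsetI (g : List (List Int)) (i j : Int) (v : Int) : List (List Int) :=
  g.set i.toNat ((g.getD i.toNat []).set j.toNat v)

-- body of A's innermost `if`: mark the neighbour and append it to newq
def aCell (n : Int) (st : List (List Int) × List (Int × Int)) (c : Int × Int) :
    List (List Int) × List (Int × Int) :=
  if 0 ≤ c.1 ∧ c.1 < n ∧ 0 ≤ c.2 ∧ c.2 < n ∧ gvI st.1 c.1 c.2 = 0 then
    (gsetI st.1 c.1 c.2 1, st.2 ++ [c])
  else st

-- one run of A's `for i, j in queue: for ii, jj in …` body, from state (grid, newq)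
def aStep (n : Int) (st : List (List Int) × List (Int × Int)) (q : List (Int × Int)) :
    List (List Int) × List (Int × Int) :=
  q.foldl (fun st p => (nbrs p).foldl (aCell n) st) st

-- A's `while queue:` loop (fuel n*n+1 is enough: every round but the last marks a cell)
def aLoop (n : Int) : Nat → List (List Int) → List (Int × Int) → Int → Int
  | 0, _, _, ans => ans
  | f + 1, g, q, ans =>
    if q = [] then ans
    else
      let st := aStep n (g, []) q
      aLoop n f st.1 st.2 (ans + 1)

-- A's initial queue comprehension
def q0 (grid : List (List Int)) : List (Int × Int) :=
  (List.range grid.length).flatMap (fun (i : Nat) =>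
    ((List.range grid.length).filter (fun (j : Nat) => gvI grid (↑i) (↑j) ≠ 0)).map
      (fun (j : Nat) => ((↑i : Int), (↑j : Int))))

def solution_777_5 (grid : List (List Int)) : Int :=
  let n : Int := grid.length
  let ans := aLoop n (grid.length * grid.length + 1) grid (q0 grid) (-1)
  if ans = 0 then -1 else ans

-- ===== PORT B =====
-- B's grid read g[i][j] (B's rows are exactly n long where it reads; exact there)
def gv (g : List (List Int)) (i j : Nat) : Int := (g.getD i []).getD j 0

-- B's `dilated`: rebuild the whole grid, zero cells with a nonzero 4-neighbour become 1
def dilated (n : Nat) (g : List (List Int)) : List (List Int) :=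
  (List.range n).map (fun i =>
    (List.range n).map (fun j =>
      if gv g i j ≠ 0 then gv g i j
      else
        if (nbrs ((i : Int), (j : Int))).any (fun c =>
            decide (0 ≤ c.1 ∧ c.1 < (n : Int) ∧ 0 ≤ c.2 ∧ c.2 < (n : Int)) &&
              (gvI g c.1 c.2 != 0)) then 1
        else 0))

-- B's `while True:` loop (fuel n*n+1 is enough: every counted round marks a cell)
def bLoop (n : Nat) : Nat → List (List Int) → Int → Int
  | 0, _, cnt => cnt
  | f + 1, g, cnt =>
    let h := dilated n g
    if h = g then cnt else bLoop n f h (cnt + 1)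

def solution_777_5_alt (grid : List (List Int)) : Int :=
  let n := grid.length
  let cnt := bLoop n (n * n + 1) (grid.map (fun r => r.take n)) 0
  if cnt = 0 then -1 else cnt

-- ===== PRECONDITION & SPEC =====
-- Pre_ excludes grids with a row shorter than len(grid): there A raises IndexError.
def Pre_solution_777_5 (grid : List (List Int)) : Prop :=
  ∀ r ∈ grid, grid.length ≤ r.length
instance (grid : List (List Int)) : Decidable (Pre_solution_777_5 grid) := by
  unfold Pre_solution_777_5; infer_instance

def pvWitness_solution_777_5 : List (List Int) := [[1, 0], [0, 0]]

def Spec_solution_777_5 (grid : List (List Int)) (out : Int) : Prop := out = solution_777_5_alt grid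
instance (grid : List (List Int)) (out : Int) : Decidable (Spec_solution_777_5 grid out) := by unfold Spec_solution_777_5; infer_instance

-- ===== CLAIM (what is proved, stated in full; the proofs are below) =====
def Claim_equal_solution_777_5 : Prop := ∀ (grid : List (List Int)), Dom_solution_777_5 grid → Pre_solution_777_5 grid → Spec_solution_777_5 grid (solution_777_5 grid)

-- ===== LEMMAS AND PROOFS =====

-- in-bounds predicate 0 ≤ i < n ∧ 0 ≤ j < n
def inb (n : Nat) (c : Int × Int) : Prop :=
  0 ≤ c.1 ∧ c.1 < (n : Int) ∧ 0 ≤ c.2 ∧ c.2 < (n : Int)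

-- shape of A's working grid: n rows, each at least n long
def wfA (n : Nat) (g : List (List Int)) : Prop := g.length = n ∧ ∀ r ∈ g, n ≤ r.length
-- shape of B's working grid: n rows of exactly n
def wfB (n : Nat) (g : List (List Int)) : Prop := g.length = n ∧ ∀ r ∈ g, r.length = n

-- A's loop invariant: queue cells are in-bounds and nonzero, and every nonzero
-- in-bounds cell off the queue already has all its in-bounds neighbours nonzero
def invA (n : Nat) (g : List (List Int)) (q : List (Int × Int)) : Prop :=
  (∀ p ∈ q, inb n p ∧ gvI g p.1 p.2 ≠ 0) ∧
  (∀ c, inb n c → gvI g c.1 c.2 ≠ 0 → c ∉ q →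
    ∀ d ∈ nbrs c, inb n d → gvI g d.1 d.2 ≠ 0)

-- the two working grids agree on all in-bounds cells
def agree (n : Nat) (gA gB : List (List Int)) : Prop :=
  ∀ c, inb n c → gvI gA c.1 c.2 = gvI gB c.1 c.2

-- number of in-bounds zero cells (termination measure)
def zcount (n : Nat) (g : List (List Int)) : Nat :=
  ((Finset.range n ×ˢ Finset.range n).filter
    (fun c : Nat × Nat => gvI g c.1 c.2 = 0)).card

theorem gv_set_self (g : List (List Int)) (i j : Nat) (v : Int)
    (hi : i < g.length) (hj : j < (g.getD i []).length) :
    gv (g.set i ((g.getD i []).set j v)) i j = v := by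
  have hg : g.getD i [] = g[i] := by
    simp [List.getD_eq_getElem?_getD, List.getElem?_eq_getElem hi]
  rw [hg] at hj
  simp [gv, List.getD_eq_getElem?_getD, List.getElem?_set, hi, hj]

theorem gv_set_ne (g : List (List Int)) (i j i' j' : Nat) (v : Int)
    (h : i ≠ i' ∨ j ≠ j') :
    gv (g.set i ((g.getD i []).set j v)) i' j' = gv g i' j' := by
  rcases h with h | h
  · simp [gv, List.getD_eq_getElem?_getD, List.getElem?_set, h]
  · by_cases hii : i = i'
    · subst hii
      by_cases hlt : i < g.length
      · have hg : g.getD i [] = g[i] := by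
          simp [List.getD_eq_getElem?_getD, List.getElem?_eq_getElem hlt]
        simp [gv, List.getD_eq_getElem?_getD, List.getElem?_set, h, hg, hlt,
          List.getElem?_eq_getElem hlt]
      · simp [gv, List.getD_eq_getElem?_getD, List.getElem?_set, hlt]
    · simp [gv, List.getD_eq_getElem?_getD, List.getElem?_set, hii]

theorem mem_nbrs_symm (c d : Int × Int) : c ∈ nbrs d ↔ d ∈ nbrs c := by
  simp only [nbrs, List.mem_cons, List.not_mem_nil, or_false, Prod.ext_iff]
  constructor <;> (rintro (⟨h1, h2⟩ | ⟨h1, h2⟩ | ⟨h1, h2⟩ | ⟨h1, h2⟩) <;> omega)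

theorem wfA_gsetI (n : Nat) (g : List (List Int)) (i j : Int) (v : Int)
    (hw : wfA n g) : wfA n (gsetI g i j v) := by
  obtain ⟨hl, hr⟩ := hw
  refine ⟨by simp [gsetI, hl], ?_⟩
  intro r hrmem
  unfold gsetI at hrmem
  by_cases hi : i.toNat < g.length
  · rcases List.mem_or_eq_of_mem_set hrmem with hmem | heq
    · exact hr r hmem
    · subst heq
      simp only [List.length_set]
      have hg : g.getD i.toNat [] = g[i.toNat] := by
        simp [List.getD_eq_getElem?_getD, List.getElem?_eq_getElem hi]
      rw [hg]
      exact hr _ (List.getElem_mem hi)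
  · rw [List.set_eq_of_length_le (by omega)] at hrmem
    exact hr r hrmem

theorem gvI_gsetI_self (n : Nat) (g : List (List Int)) (i j : Int) (v : Int)
    (hw : wfA n g) (hc : inb n (i, j)) : gvI (gsetI g i j v) i j = v := by
  obtain ⟨h1, h2, h3, h4⟩ := hc
  have hgl := hw.1
  have hlen : i.toNat < g.length := by omega
  apply gv_set_self
  · exact hlen
  · have hg : g.getD i.toNat [] = g[i.toNat] := by
      simp [List.getD_eq_getElem?_getD, List.getElem?_eq_getElem hlen]
    have := hw.2 _ (hg ▸ List.getElem_mem hlen)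
    omega

theorem gvI_gsetI_ne (g : List (List Int)) (i j i' j' v : Int)
    (hne : ¬(i = i' ∧ j = j')) (h0i : 0 ≤ i) (h0j : 0 ≤ j)
    (h0i' : 0 ≤ i') (h0j' : 0 ≤ j') :
    gvI (gsetI g i j v) i' j' = gvI g i' j' :=
  gv_set_ne g i.toNat j.toNat i'.toNat j'.toNat v (by omega)

theorem cells_fold (n : Nat) (cs : List (Int × Int)) (g : List (List Int))
    (acc : List (Int × Int)) (hw : wfA n g) :
    wfA n (cs.foldl (aCell (n : Int)) (g, acc)).1
    ∧ (∀ c, inb n c →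
        gvI (cs.foldl (aCell (n : Int)) (g, acc)).1 c.1 c.2 =
          if gvI g c.1 c.2 = 0 ∧ c ∈ cs then 1 else gvI g c.1 c.2)
    ∧ (∀ c, c ∈ (cs.foldl (aCell (n : Int)) (g, acc)).2 ↔
        c ∈ acc ∨ (inb n c ∧ gvI g c.1 c.2 = 0 ∧ c ∈ cs)) := by
  induction cs generalizing g acc with
  | nil => simpa using hw
  | cons c0 cs ih =>
    simp only [List.foldl_cons]
    by_cases h0 : 0 ≤ c0.1 ∧ c0.1 < (n : Int) ∧ 0 ≤ c0.2 ∧ c0.2 < (n : Int) ∧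
        gvI g c0.1 c0.2 = 0
    · have hstep : aCell (n : Int) (g, acc) c0 = (gsetI g c0.1 c0.2 1, acc ++ [c0]) := by
        simp [aCell, h0]
      rw [hstep]
      have hinb0 : inb n c0 := ⟨h0.1, h0.2.1, h0.2.2.1, h0.2.2.2.1⟩
      have hw1 : wfA n (gsetI g c0.1 c0.2 1) := wfA_gsetI n g c0.1 c0.2 1 hw
      obtain ⟨hwf, h1, h2⟩ := ih (gsetI g c0.1 c0.2 1) (acc ++ [c0]) hw1
      have hval : ∀ c : Int × Int, inb n c →
          gvI (gsetI g c0.1 c0.2 1) c.1 c.2 = if c = c0 then 1 else gvI g c.1 c.2 := by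
        intro c hc
        by_cases hcc : c = c0
        · subst hcc
          simp only [if_pos rfl]
          exact gvI_gsetI_self n g c.1 c.2 1 hw hc
        · rw [if_neg hcc]
          exact gvI_gsetI_ne g c0.1 c0.2 c.1 c.2 1
            (by intro ⟨e1, e2⟩; exact hcc (Prod.ext e1.symm e2.symm))
            h0.1 h0.2.2.1 hc.1 hc.2.2.1
      refine ⟨hwf, ?_, ?_⟩
      · intro c hc
        rw [h1 c hc, hval c hc]
        by_cases hcc : c = c0
        · subst hcc
          simp [h0.2.2.2.2]
        · simp only [if_neg hcc, List.mem_cons]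
          by_cases hmem : c ∈ cs <;> by_cases hz : gvI g c.1 c.2 = 0 <;>
            simp [hmem, hz, hcc]
      · intro c
        rw [h2 c]
        simp only [List.mem_append, List.mem_cons, List.not_mem_nil, or_false]
        constructor
        · rintro ((hacc | rfl) | ⟨hinb, hz, hmem⟩)
          · exact Or.inl hacc
          · exact Or.inr ⟨hinb0, h0.2.2.2.2, Or.inl rfl⟩
          · refine Or.inr ⟨hinb, ?_, Or.inr hmem⟩
            by_cases hcc : c = c0
            · subst hcc; exact h0.2.2.2.2
            · rw [hval c hinb, if_neg hcc] at hz; exact hz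
        · rintro (hacc | ⟨hinb, hz, (rfl | hmem)⟩)
          · exact Or.inl (Or.inl hacc)
          · exact Or.inl (Or.inr rfl)
          · by_cases hcc : c = c0
            · exact Or.inl (Or.inr hcc)
            · refine Or.inr ⟨hinb, ?_, hmem⟩
              rw [hval c hinb, if_neg hcc]; exact hz
    · have hstep : aCell (n : Int) (g, acc) c0 = (g, acc) := by
        simp only [aCell]
        rw [if_neg (by exact fun h => h0 h)]
      rw [hstep]
      obtain ⟨hwf, h1, h2⟩ := ih g acc hw
      refine ⟨hwf, ?_, ?_⟩
      · intro c hc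
        rw [h1 c hc]
        by_cases hcc : c = c0
        · subst hcc
          have hnz : ¬ gvI g c.1 c.2 = 0 := fun hz =>
            h0 ⟨hc.1, hc.2.1, hc.2.2.1, hc.2.2.2, hz⟩
          simp [hnz]
        · simp only [List.mem_cons]
          by_cases hmem : c ∈ cs <;> by_cases hz : gvI g c.1 c.2 = 0 <;>
            simp [hmem, hz, hcc]
      · intro c
        rw [h2 c]
        constructor
        · rintro (hacc | ⟨hinb, hz, hmem⟩)
          · exact Or.inl hacc
          · exact Or.inr ⟨hinb, hz, List.mem_cons_of_mem _ hmem⟩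
        · rintro (hacc | ⟨hinb, hz, hmem⟩)
          · exact Or.inl hacc
          · rcases List.mem_cons.mp hmem with rfl | hmem
            · exact absurd ⟨hinb.1, hinb.2.1, hinb.2.2.1, hinb.2.2.2, hz⟩ h0
            · exact Or.inr ⟨hinb, hz, hmem⟩

theorem astep_char (n : Nat) (q : List (Int × Int)) (g : List (List Int))
    (acc : List (Int × Int)) (hw : wfA n g) :
    wfA n (aStep (n : Int) (g, acc) q).1
    ∧ (∀ c, inb n c →
        gvI (aStep (n : Int) (g, acc) q).1 c.1 c.2 =
          if gvI g c.1 c.2 = 0 ∧ (∃ p ∈ q, c ∈ nbrs p) then 1 else gvI g c.1 c.2)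
    ∧ (∀ c, c ∈ (aStep (n : Int) (g, acc) q).2 ↔
        c ∈ acc ∨ (inb n c ∧ gvI g c.1 c.2 = 0 ∧ ∃ p ∈ q, c ∈ nbrs p)) := by
  induction q generalizing g acc with
  | nil => simpa [aStep] using hw
  | cons p q ih =>
    obtain ⟨hw1, hv1, hm1⟩ := cells_fold n (nbrs p) g acc hw
    have hfold : aStep (n : Int) (g, acc) (p :: q) =
        aStep (n : Int) (((nbrs p).foldl (aCell (n : Int)) (g, acc)).1,
          ((nbrs p).foldl (aCell (n : Int)) (g, acc)).2) q := rfl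
    obtain ⟨hwf, hv, hm⟩ := ih ((nbrs p).foldl (aCell (n : Int)) (g, acc)).1
      ((nbrs p).foldl (aCell (n : Int)) (g, acc)).2 hw1
    rw [hfold]
    refine ⟨hwf, ?_, ?_⟩
    · intro c hcb
      rw [hv c hcb, hv1 c hcb]
      by_cases hz : gvI g c.1 c.2 = 0 <;> by_cases hmp : c ∈ nbrs p <;>
        by_cases hq : ∃ p' ∈ q, c ∈ nbrs p' <;>
        simp [hz, hmp, hq, List.exists_mem_cons_iff]
    · intro c
      rw [hm c, hm1 c]
      constructor
      · rintro ((hacc | ⟨hi, hz, hmp⟩) | ⟨hi, hz1, hq⟩)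
        · exact Or.inl hacc
        · exact Or.inr ⟨hi, hz, ⟨p, List.mem_cons_self, hmp⟩⟩
        · rw [hv1 c hi] at hz1
          split_ifs at hz1 with hcond
          · exact absurd hz1 (by norm_num)
          · refine Or.inr ⟨hi, hz1, ?_⟩
            obtain ⟨p', hp', hcp'⟩ := hq
            exact ⟨p', List.mem_cons_of_mem _ hp', hcp'⟩
      · rintro (hacc | ⟨hi, hz, p', hp', hcp'⟩)
        · exact Or.inl (Or.inl hacc)
        · rcases List.mem_cons.mp hp' with rfl | hp'
          · exact Or.inl (Or.inr ⟨hi, hz, hcp'⟩)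
          · by_cases hmp : c ∈ nbrs p
            · exact Or.inl (Or.inr ⟨hi, hz, hmp⟩)
            · refine Or.inr ⟨hi, ?_, ⟨p', hp', hcp'⟩⟩
              rw [hv1 c hi, if_neg (by tauto)]
              exact hz

theorem dilated_gv (n : Nat) (g : List (List Int)) (i j : Nat)
    (hi : i < n) (hj : j < n) :
    gv (dilated n g) i j =
      if gv g i j ≠ 0 then gv g i j
      else
        if (nbrs ((i : Int), (j : Int))).any (fun c =>
            decide (0 ≤ c.1 ∧ c.1 < (n : Int) ∧ 0 ≤ c.2 ∧ c.2 < (n : Int)) &&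
              (gvI g c.1 c.2 != 0)) then 1
        else 0 := by
  rw [gv, dilated]
  rw [List.getD_eq_getElem?_getD (l := (List.range n).map _), List.getElem?_map,
    List.getElem?_range hi]
  simp only [Option.map_some, Option.getD_some]
  rw [List.getD_eq_getElem?_getD (l := (List.range n).map _), List.getElem?_map,
    List.getElem?_range hj]
  simp only [Option.map_some, Option.getD_some]

theorem wfB_dilated (n : Nat) (g : List (List Int)) : wfB n (dilated n g) := by
  constructor
  · simp [dilated]
  · intro r hr
    simp only [dilated, List.mem_map] at hr
    obtain ⟨i, _, rfl⟩ := hr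
    simp

theorem gv_getElem (g : List (List Int)) (i j : Nat)
    (hi : i < g.length) (hj : j < g[i].length) : gv g i j = g[i][j] := by
  have h1 : g.getD i [] = g[i] := by
    simp [List.getD_eq_getElem?_getD, List.getElem?_eq_getElem hi]
  rw [gv, h1]
  simp [List.getD_eq_getElem?_getD, List.getElem?_eq_getElem hj]

theorem wfB_ext (n : Nat) (g h : List (List Int)) (hg : wfB n g) (hh : wfB n h)
    (he : ∀ i j, i < n → j < n → gv g i j = gv h i j) : g = h := by
  apply List.ext_getElem (by rw [hg.1, hh.1])
  intro i h1 h2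
  have hgi : g[i].length = n := hg.2 _ (List.getElem_mem h1)
  have hhi : h[i].length = n := hh.2 _ (List.getElem_mem h2)
  apply List.ext_getElem (by rw [hgi, hhi])
  intro j hj1 hj2
  have hgl := hg.1
  have := he i j (by omega) (by omega)
  rwa [gv_getElem g i j h1 hj1, gv_getElem h i j h2 hj2] at this

-- any-over-neighbours as an existential
theorem any_nbr_iff (n : Nat) (g : List (List Int)) (c : Int × Int) :
    ((nbrs c).any (fun d =>
        decide (0 ≤ d.1 ∧ d.1 < (n : Int) ∧ 0 ≤ d.2 ∧ d.2 < (n : Int)) &&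
          (gvI g d.1 d.2 != 0)) = true) ↔
      ∃ d ∈ nbrs c, inb n d ∧ gvI g d.1 d.2 ≠ 0 := by
  simp [List.any_eq_true, inb, bne_iff_ne, and_assoc]

theorem inb_pair_eta (n : Nat) (c : Int × Int) (hc : inb n c) :
    ((c.1.toNat : Int), (c.2.toNat : Int)) = c :=
  Prod.ext (Int.toNat_of_nonneg hc.1) (Int.toNat_of_nonneg hc.2.2.1)

-- a zero cell is adjacent to a queue cell iff it has a nonzero in-bounds neighbour
theorem new_iff (n : Nat) (gA gB : List (List Int)) (q : List (Int × Int))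
    (hInv : invA n gA q) (hAg : agree n gA gB) (c : Int × Int) (hc : inb n c)
    (hz : gvI gA c.1 c.2 = 0) :
    (∃ p ∈ q, c ∈ nbrs p) ↔ ∃ d ∈ nbrs c, inb n d ∧ gvI gB d.1 d.2 ≠ 0 := by
  constructor
  · rintro ⟨p, hp, hcp⟩
    obtain ⟨hpinb, hpnz⟩ := hInv.1 p hp
    exact ⟨p, (mem_nbrs_symm c p).mp hcp, hpinb, by rw [← hAg p hpinb]; exact hpnz⟩
  · rintro ⟨d, hd, hdinb, hdnz⟩
    rw [← hAg d hdinb] at hdnz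
    by_cases hdq : d ∈ q
    · exact ⟨d, hdq, (mem_nbrs_symm d c).mp hd⟩
    · exact absurd (hInv.2 d hdinb hdnz hdq c ((mem_nbrs_symm d c).mp hd) hc) (by simp [hz])

theorem dilated_fix_iff (n : Nat) (gA gB : List (List Int)) (q : List (Int × Int))
    (hInv : invA n gA q) (hAg : agree n gA gB) (hwB : wfB n gB) :
    dilated n gB = gB ↔
      ∀ c, ¬ (inb n c ∧ gvI gA c.1 c.2 = 0 ∧ ∃ p ∈ q, c ∈ nbrs p) := by
  constructor
  · intro hfix c ⟨hc, hz, hadj⟩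
    have hzB : gv gB c.1.toNat c.2.toNat = 0 := by
      have := hAg c hc
      rw [this] at hz
      exact hz
    have hnbr := (new_iff n gA gB q hInv hAg c hc hz).mp hadj
    have hval := dilated_gv n gB c.1.toNat c.2.toNat (by have h1 := hc.1; have h2 := hc.2.1; omega)
      (by have h1 := hc.2.2.1; have h2 := hc.2.2.2; omega)
    rw [hfix, hzB, inb_pair_eta n c hc] at hval
    rw [if_neg (by simp), if_pos ((any_nbr_iff n gB c).mpr hnbr)] at hval
    exact absurd hval (by norm_num)
  · intro hno
    apply wfB_ext n (dilated n gB) gB (wfB_dilated n gB) hwB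
    intro i j hi hj
    rw [dilated_gv n gB i j hi hj]
    by_cases hnz : gv gB i j ≠ 0
    · rw [if_pos hnz]
    · rw [if_neg hnz]
      rw [not_ne_iff] at hnz
      have hcinb : inb n ((i : Int), (j : Int)) := by
        refine ⟨by omega, by omega, by omega, by omega⟩
      have hzA : gvI gA (i : Int) (j : Int) = 0 := by
        have h := hAg ((i : Int), (j : Int)) hcinb
        simp only at h
        rw [h]
        exact hnz
      rw [if_neg ?hany]
      · exact hnz.symm
      case hany =>
        intro hany
        have := (any_nbr_iff n gB ((i : Int), (j : Int))).mp hany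
        have hadj := (new_iff n gA gB q hInv hAg ((i : Int), (j : Int)) hcinb hzA).mpr this
        exact hno ((i : Int), (j : Int)) ⟨hcinb, hzA, hadj⟩

theorem agree_step (n : Nat) (gA gB : List (List Int)) (q : List (Int × Int))
    (hwA : wfA n gA) (hInv : invA n gA q) (hAg : agree n gA gB) :
    agree n (aStep (n : Int) (gA, []) q).1 (dilated n gB) := by
  intro c hc
  obtain ⟨_, hv, _⟩ := astep_char n q gA [] hwA
  rw [hv c hc]
  have hRB : gvI (dilated n gB) c.1 c.2 = gv (dilated n gB) c.1.toNat c.2.toNat := rfl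
  rw [hRB, dilated_gv n gB c.1.toNat c.2.toNat (by have h1 := hc.1; have h2 := hc.2.1; omega)
    (by have h1 := hc.2.2.1; have h2 := hc.2.2.2; omega), inb_pair_eta n c hc]
  have hBA : gv gB c.1.toNat c.2.toNat = gvI gA c.1 c.2 := (hAg c hc).symm
  rw [hBA]
  by_cases hz : gvI gA c.1 c.2 = 0
  · by_cases hadj : ∃ p ∈ q, c ∈ nbrs p
    · rw [if_pos ⟨hz, hadj⟩, if_neg (by simp [hz]),
        if_pos ((any_nbr_iff n gB c).mpr ((new_iff n gA gB q hInv hAg c hc hz).mp hadj))]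
    · rw [if_neg (fun h => hadj h.2), if_neg (by simp [hz]),
        if_neg (fun hany => hadj ((new_iff n gA gB q hInv hAg c hc hz).mpr
          ((any_nbr_iff n gB c).mp hany))), hz]
  · rw [if_neg (fun h => hz h.1), if_pos hz]

theorem inv_step (n : Nat) (gA : List (List Int)) (q : List (Int × Int))
    (hwA : wfA n gA) (hInv : invA n gA q) :
    invA n (aStep (n : Int) (gA, []) q).1 (aStep (n : Int) (gA, []) q).2 := by
  obtain ⟨hwf, hv, hm⟩ := astep_char n q gA [] hwA
  constructor
  · intro p hp
    have hmem := (hm p).mp hp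
    simp only [List.not_mem_nil, false_or] at hmem
    obtain ⟨hpi, hpz, hpadj⟩ := hmem
    refine ⟨hpi, ?_⟩
    rw [hv p hpi, if_pos ⟨hpz, hpadj⟩]
    norm_num
  · intro c hc hcnz hcq d hd hdinb
    rw [hv d hdinb]
    by_cases hdz : gvI gA d.1 d.2 = 0
    · have hdadj : ∃ p ∈ q, d ∈ nbrs p := by
        rw [hv c hc] at hcnz
        by_cases hcz : gvI gA c.1 c.2 = 0
        · by_cases hcadj : ∃ p ∈ q, c ∈ nbrs p
          · exact absurd ((hm c).mpr (Or.inr ⟨hc, hcz, hcadj⟩)) hcq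
          · rw [if_neg (fun h => hcadj h.2)] at hcnz
            exact absurd hcz hcnz
        · by_cases hcinq : c ∈ q
          · exact ⟨c, hcinq, hd⟩
          · exact absurd (hInv.2 c hc hcz hcinq d hd hdinb) (by simp [hdz])
      rw [if_pos ⟨hdz, hdadj⟩]
      norm_num
    · rw [if_neg (fun h => hdz h.1)]
      exact hdz

theorem zcount_mono (n : Nat) (gA : List (List Int)) (q : List (Int × Int))
    (hwA : wfA n gA) :
    ((Finset.range n ×ˢ Finset.range n).filter
      (fun c : Nat × Nat => gvI (aStep (n : Int) (gA, []) q).1 c.1 c.2 = 0)) ⊆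
    ((Finset.range n ×ˢ Finset.range n).filter
      (fun c : Nat × Nat => gvI gA c.1 c.2 = 0)) := by
  obtain ⟨_, hv, _⟩ := astep_char n q gA [] hwA
  intro x hx
  simp only [Finset.mem_filter, Finset.mem_product, Finset.mem_range] at hx ⊢
  obtain ⟨⟨hx1, hx2⟩, hxz⟩ := hx
  refine ⟨⟨hx1, hx2⟩, ?_⟩
  have hinb : inb n ((x.1 : Int), (x.2 : Int)) := ⟨by omega, by omega, by omega, by omega⟩
  have := hv ((x.1 : Int), (x.2 : Int)) hinb
  simp only at this
  rw [this] at hxz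
  split_ifs at hxz with hcond
  · exact absurd hxz (by norm_num)
  · exact hxz

theorem zcount_step_lt (n : Nat) (gA : List (List Int)) (q : List (Int × Int))
    (hwA : wfA n gA) (hne : (aStep (n : Int) (gA, []) q).2 ≠ []) :
    zcount n (aStep (n : Int) (gA, []) q).1 < zcount n gA := by
  obtain ⟨_, hv, hm⟩ := astep_char n q gA [] hwA
  obtain ⟨c, hcmem⟩ := List.exists_mem_of_ne_nil _ hne
  have hmem := (hm c).mp hcmem
  simp only [List.not_mem_nil, false_or] at hmem
  obtain ⟨hci, hcz, hcadj⟩ := hmem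
  apply Finset.card_lt_card
  rw [Finset.ssubset_iff_of_subset (zcount_mono n gA q hwA)]
  refine ⟨(c.1.toNat, c.2.toNat), ?_, ?_⟩
  · simp only [Finset.mem_filter, Finset.mem_product, Finset.mem_range]
    refine ⟨⟨by have h1 := hci.1; have h2 := hci.2.1; omega, by have h1 := hci.2.2.1; have h2 := hci.2.2.2; omega⟩, ?_⟩
    show gvI gA (c.1.toNat : Int) (c.2.toNat : Int) = 0
    have heta := inb_pair_eta n c hci
    rw [show ((c.1.toNat : Int)) = c.1 from congrArg Prod.fst heta,
      show ((c.2.toNat : Int)) = c.2 from congrArg Prod.snd heta]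
    exact hcz
  · simp only [Finset.mem_filter, Finset.mem_product, Finset.mem_range, not_and]
    intro _
    show ¬ gvI _ (c.1.toNat : Int) (c.2.toNat : Int) = 0
    have heta := inb_pair_eta n c hci
    rw [show ((c.1.toNat : Int)) = c.1 from congrArg Prod.fst heta,
      show ((c.2.toNat : Int)) = c.2 from congrArg Prod.snd heta]
    rw [hv c hci, if_pos ⟨hcz, hcadj⟩]
    norm_num

theorem loop_eq (n : Nat) : ∀ (f : Nat) (gA gB : List (List Int))
    (q : List (Int × Int)) (a : Int),
    wfA n gA → wfB n gB → invA n gA q → agree n gA gB → q ≠ [] →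
    zcount n gA < f →
    aLoop (n : Int) (f + 1) gA q a = bLoop n (f + 1) gB (a + 1) := by
  intro f
  induction f with
  | zero => intro gA gB q a _ _ _ _ _ hz; omega
  | succ f ih =>
    intro gA gB q a hwA hwB hInv hAg hq hz
    obtain ⟨hwf, hv, hm⟩ := astep_char n q gA [] hwA
    rw [aLoop, if_neg hq, bLoop]
    simp only
    by_cases hst : (aStep (n : Int) (gA, []) q).2 = []
    · have hfix : dilated n gB = gB := by
        rw [dilated_fix_iff n gA gB q hInv hAg hwB]
        intro c hcontra
        have : c ∈ (aStep (n : Int) (gA, []) q).2 :=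
          (hm c).mpr (Or.inr ⟨hcontra.1, hcontra.2.1, hcontra.2.2⟩)
        rw [hst] at this
        exact absurd this (List.not_mem_nil)
      rw [if_pos hfix, hst, aLoop, if_pos rfl]
    · have hfix : ¬ dilated n gB = gB := by
        rw [dilated_fix_iff n gA gB q hInv hAg hwB]
        intro hall
        obtain ⟨c, hcmem⟩ := List.exists_mem_of_ne_nil _ hst
        have hmem := (hm c).mp hcmem
        simp only [List.not_mem_nil, false_or] at hmem
        exact hall c ⟨hmem.1, hmem.2.1, hmem.2.2⟩
      rw [if_neg hfix]
      exact ih (aStep (n : Int) (gA, []) q).1 (dilated n gB)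
        (aStep (n : Int) (gA, []) q).2 (a + 1) hwf (wfB_dilated n gB)
        (inv_step n gA q hwA hInv) (agree_step n gA gB q hwA hInv hAg) hst
        (by have := zcount_step_lt n gA q hwA hst; omega)

theorem q0_mem (grid : List (List Int)) (c : Int × Int) :
    c ∈ q0 grid ↔ inb grid.length c ∧ gvI grid c.1 c.2 ≠ 0 := by
  constructor
  · intro h
    rw [q0, List.mem_flatMap] at h
    obtain ⟨i, hi, h2⟩ := h
    rw [List.mem_map] at h2
    obtain ⟨j, hj, rfl⟩ := h2
    rw [List.mem_filter] at hj
    obtain ⟨hjr, hnz⟩ := hj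
    have hi' := List.mem_range.mp hi
    have hj' := List.mem_range.mp hjr
    exact ⟨⟨by omega, by omega, by omega, by omega⟩, by simpa using hnz⟩
  · rintro ⟨hc, hnz⟩
    rw [q0, List.mem_flatMap]
    refine ⟨c.1.toNat, List.mem_range.mpr (by have h1 := hc.1; have h2 := hc.2.1; omega), ?_⟩
    rw [List.mem_map]
    refine ⟨c.2.toNat, ?_, inb_pair_eta _ c hc⟩
    rw [List.mem_filter]
    refine ⟨List.mem_range.mpr (by have h1 := hc.2.2.1; have h2 := hc.2.2.2; omega), ?_⟩
    have heta := inb_pair_eta _ c hc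
    rw [show ((c.1.toNat : Int)) = c.1 from congrArg Prod.fst heta,
      show ((c.2.toNat : Int)) = c.2 from congrArg Prod.snd heta]
    simpa using hnz

theorem zcount_lt_of_nonzero (n : Nat) (g : List (List Int)) (c : Int × Int)
    (hc : inb n c) (hnz : gvI g c.1 c.2 ≠ 0) : zcount n g < n * n := by
  have : zcount n g < (Finset.range n ×ˢ Finset.range n).card := by
    apply Finset.card_lt_card
    rw [Finset.ssubset_iff_of_subset (Finset.filter_subset _ _)]
    refine ⟨(c.1.toNat, c.2.toNat), ?_, ?_⟩
    · simp only [Finset.mem_product, Finset.mem_range]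
      exact ⟨by have h1 := hc.1; have h2 := hc.2.1; omega, by have h1 := hc.2.2.1; have h2 := hc.2.2.2; omega⟩
    · simp only [Finset.mem_filter, not_and]
      intro _
      show ¬ gvI g (c.1.toNat : Int) (c.2.toNat : Int) = 0
      have heta := inb_pair_eta n c hc
      rw [show ((c.1.toNat : Int)) = c.1 from congrArg Prod.fst heta,
        show ((c.2.toNat : Int)) = c.2 from congrArg Prod.snd heta]
      exact hnz
  simpa [Finset.card_product] using this

theorem agree_init (grid : List (List Int)) (hPre : Pre_solution_777_5 grid) :
    agree grid.length grid (grid.map (fun r => r.take grid.length)) := by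
  intro c hc
  show gv grid c.1.toNat c.2.toNat = gv (grid.map fun r => r.take grid.length) c.1.toNat c.2.toNat
  have hi : c.1.toNat < grid.length := by have h1 := hc.1; have h2 := hc.2.1; omega
  have hj : c.2.toNat < grid.length := by have h1 := hc.2.2.1; have h2 := hc.2.2.2; omega
  have hg : grid.getD c.1.toNat [] = grid[c.1.toNat] := by
    simp [List.getD_eq_getElem?_getD, List.getElem?_eq_getElem hi]
  rw [gv, gv, List.getD_eq_getElem?_getD (l := grid.map _), List.getElem?_map,
    List.getElem?_eq_getElem hi]
  simp only [Option.map_some, Option.getD_some]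
  rw [hg, List.getD_eq_getElem?_getD, List.getD_eq_getElem?_getD,
    List.getElem?_take_of_lt hj]

theorem wfB_init (grid : List (List Int)) (hPre : Pre_solution_777_5 grid) :
    wfB grid.length (grid.map (fun r => r.take grid.length)) := by
  refine ⟨by simp, ?_⟩
  intro r hr
  simp only [List.mem_map] at hr
  obtain ⟨r', hr', rfl⟩ := hr
  have := hPre r' hr'
  simp [List.length_take]
  omega

theorem invA_init (grid : List (List Int)) :
    invA grid.length grid (q0 grid) := by
  constructor
  · intro p hp
    exact ((q0_mem grid p).mp hp)
  · intro c hc hcnz hcq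
    exact absurd ((q0_mem grid c).mpr ⟨hc, hcnz⟩) hcq

-- ===== VERDICT (by name: the statement is the Claim_ definition above) =====
theorem solution_777_5_spec : Claim_equal_solution_777_5 := by
  intro grid _ hPre
  show solution_777_5 grid = solution_777_5_alt grid
  simp only [solution_777_5, solution_777_5_alt]
  by_cases hq : q0 grid = []
  · have hwB := wfB_init grid hPre
    have hfix : dilated grid.length (grid.map fun r => r.take grid.length) =
        grid.map fun r => r.take grid.length := by
      rw [dilated_fix_iff grid.length grid _ (q0 grid) (invA_init grid)
        (agree_init grid hPre) hwB]
      rintro c ⟨_, _, p, hp, _⟩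
      rw [hq] at hp
      exact absurd hp (List.not_mem_nil)
    rw [hq, aLoop, if_pos rfl, bLoop]
    simp only [if_pos hfix]
    norm_num
  · obtain ⟨c, hcmem⟩ := List.exists_mem_of_ne_nil _ hq
    obtain ⟨hci, hcnz⟩ := (q0_mem grid c).mp hcmem
    have hloop := loop_eq grid.length (grid.length * grid.length) grid
      (grid.map fun r => r.take grid.length) (q0 grid) (-1)
      ⟨rfl, hPre⟩ (wfB_init grid hPre) (invA_init grid) (agree_init grid hPre) hq
      (zcount_lt_of_nonzero grid.length grid c hci hcnz)
    rw [hloop]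
    norm_num
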